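-- pv_equiv track=rewrite | github.com/MrBrantCode/unitest_baseline | mut_generate/mist_train_taco/taco_2209/solution.py | find_next_polydivisible
-- ===== SOURCE A (Python) =====
-- def find_next_polydivisible(n):
--     # Precompute the list of polydivisible numbers
--     (d, polydivisible, arr) = (1, [], list(range(1, 10)))
--     while arr:
--         d += 1
--         polydivisible.extend(arr)
--         arr = [n for x in arr for n in range(-(-x * 10 // d) * d, (x + 1) * 10, d)]
--
--     # Use binary search to find the next polydivisible number
--     from bisect import bisect
--     idx = bisect(polydivisible, n)
--
--     # Return the next polydivisible number if it exists
--     if idx < len(polydivisible):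
--         return polydivisible[idx]
--     else:
--         return None
-- ===== SOURCE B (Python) =====
-- def find_next_polydivisible(n):
--     # Streaming search: walk the polydivisible tree level by level and stop at
--     # the first level containing a number > n -- no full table, no bisect.
--     d = 1
--     arr = list(range(1, 10))
--     while arr:
--         for x in arr:
--             if x > n:
--                 return x
--         d += 1
--         arr = [c for x in arr for c in range((x * 10 + d - 1) // d * d, x * 10 + 10, d)]
--     return None
-- ===== Notes on version B (the rewrite author's own statement) =====
-- stated objective: faster
-- what changed: B streams the polydivisible tree level by level and returns at the first level containing a number > n, instead of A's precomputing the entire polydivisible table (every generation, tens of thousands of entries) on every call and binary-searching it.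
import Mathlib
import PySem

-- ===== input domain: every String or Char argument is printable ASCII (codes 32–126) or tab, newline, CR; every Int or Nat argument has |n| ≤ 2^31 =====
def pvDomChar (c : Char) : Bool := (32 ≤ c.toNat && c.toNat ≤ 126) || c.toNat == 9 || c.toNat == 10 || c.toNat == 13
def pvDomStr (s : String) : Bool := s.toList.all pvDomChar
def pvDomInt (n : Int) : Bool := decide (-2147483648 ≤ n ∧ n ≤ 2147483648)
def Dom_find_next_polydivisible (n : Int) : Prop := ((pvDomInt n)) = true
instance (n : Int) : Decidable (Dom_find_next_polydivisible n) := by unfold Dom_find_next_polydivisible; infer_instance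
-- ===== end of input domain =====

-- B replaces A's build-the-whole-table-then-binary-search with a streaming level-by-level
-- search that stops at the first level containing a number > n (objective: faster, constant factor).

-- ===== PORT A =====
-- arr = [n for x in arr for n in range(-(-x*10//d)*d, (x+1)*10, d)]
def pvExtendA (d : Int) (arr : List Int) : List Int :=
  arr.flatMap (fun x =>
    PySem.List.pyRange (-(PySem.Int.floordiv (-(x * 10)) d) * d) ((x + 1) * 10) d)

-- the while loop; fuel 30 only makes the recursion structural (the loop body runs 25 times:
-- generation 26 is empty, so the guard fails then)
def pvALoop : Nat → Int → List Int → List Int → List Int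
  | 0, _, _, poly => poly
  | f + 1, d, arr, poly =>
    if arr = [] then poly
    else pvALoop f (d + 1) (pvExtendA (d + 1) arr) (poly ++ arr)

-- bisect.bisect (= bisect_right): lo, hi are nonnegative indices, so Nat internally
def pvBisect (l : List Int) (n : Int) (lo hi : Nat) : Nat :=
  if h : lo < hi then
    if n < l.getD ((lo + hi) / 2) 0 then pvBisect l n lo ((lo + hi) / 2)
    else pvBisect l n ((lo + hi) / 2 + 1) hi
  else lo
termination_by hi - lo
decreasing_by all_goals omega

def find_next_polydivisible (n : Int) : Option Int :=
  let poly := pvALoop 30 1 (PySem.List.pyRange 1 10 1) []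
  let idx := pvBisect poly n 0 poly.length
  if idx < poly.length then PySem.List.pyGet? poly (idx : Int) else none

-- ===== PORT B =====
-- arr = [c for x in arr for c in range((x*10 + d - 1)//d * d, x*10 + 10, d)]
def pvExtendB (d : Int) (arr : List Int) : List Int :=
  arr.flatMap (fun x =>
    PySem.List.pyRange (PySem.Int.floordiv (x * 10 + d - 1) d * d) (x * 10 + 10) d)

-- the while loop of Source B: scan the current level for the first x > n, else extend;
-- fuel 30 only makes the recursion structural (generation 26 is empty)
def pvBLoop (n : Int) : Nat → Int → List Int → Option Int
  | 0, _, _ => none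
  | f + 1, d, arr =>
    if arr = [] then none
    else
      match arr.find? (fun x => decide (n < x)) with
      | some x => some x
      | none => pvBLoop n f (d + 1) (pvExtendB (d + 1) arr)

def find_next_polydivisible_alt (n : Int) : Option Int :=
  pvBLoop n 30 1 (PySem.List.pyRange 1 10 1)

-- ===== PRECONDITION & SPEC =====
def Spec_find_next_polydivisible (n : Int) (out : Option Int) : Prop := out = find_next_polydivisible_alt n
instance (n : Int) (out : Option Int) : Decidable (Spec_find_next_polydivisible n out) := by unfold Spec_find_next_polydivisible; infer_instance

-- ===== CLAIM (what is proved, stated in full; the proofs are below) =====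
def Claim_equal_find_next_polydivisible : Prop := ∀ (n : Int), Dom_find_next_polydivisible n → Spec_find_next_polydivisible n (find_next_polydivisible n)

-- ===== LEMMAS AND PROOFS =====

-- ceiling division: -(-a // d) = (a + d - 1) // d for d > 0
lemma pvCeil (a d : Int) (hd : 0 < d) :
    -(PySem.Int.floordiv (-a) d) = PySem.Int.floordiv (a + d - 1) d := by
  have h := (PySem.Int.floordiv_eq_iff_of_pos (a := a + d - 1)
    (q := PySem.Int.floordiv (a + d - 1) d) hd).mp rfl
  rw [PySem.Int.neg_floordiv_neg_eq_iff_of_pos hd]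
  constructor <;> nlinarith [h.1, h.2]

-- the two comprehensions produce the same children
lemma pvExtend_eq (d : Int) (hd : 0 < d) (arr : List Int) :
    pvExtendA d arr = pvExtendB d arr := by
  unfold pvExtendA pvExtendB
  congr 1
  funext x
  rw [pvCeil (x * 10) d hd]
  have h10 : (x + 1) * 10 = x * 10 + 10 := by ring
  rw [h10]

-- A's loop accumulates exactly the levels B scans: first match in the final
-- table = B's early-exit level scan
lemma pvLoop_eq (n : Int) : ∀ (f : Nat) (d : Int), 0 < d → ∀ (arr poly : List Int),
    (pvALoop f d arr poly).find? (fun x => decide (n < x)) =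
      (match poly.find? (fun x => decide (n < x)) with
       | some x => some x
       | none => pvBLoop n f d arr) := by
  intro f
  induction f with
  | zero =>
    intro d hd arr poly
    simp only [pvALoop, pvBLoop]
    cases poly.find? (fun x => decide (n < x)) <;> rfl
  | succ f ih =>
    intro d hd arr poly
    by_cases ha : arr = []
    · simp only [pvALoop, pvBLoop, ha, if_pos]
      cases poly.find? (fun x => decide (n < x)) <;> rfl
    · simp only [pvALoop, pvBLoop, ha, ite_false]
      rw [ih (d + 1) (by omega), List.find?_append, pvExtend_eq (d + 1) (by omega)]
      cases poly.find? (fun x => decide (n < x)) <;>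
        cases arr.find? (fun x => decide (n < x)) <;> rfl

-- sorted lists are monotone at indices
lemma pvMono (l : List Int) (hs : l.Pairwise (· ≤ ·)) (i j : Nat) (hij : i ≤ j)
    (hj : j < l.length) : l.getD i 0 ≤ l.getD j 0 := by
  rcases Nat.eq_or_lt_of_le hij with rfl | h
  · exact le_refl _
  · rw [List.getD_eq_getElem _ _ (by omega), List.getD_eq_getElem _ _ hj]
    exact List.pairwise_iff_getElem.mp hs i j (by omega) hj h

-- bisect_right on a sorted list: everything before the result is ≤ n,
-- everything from it on is > n
lemma pvBisect_correct (l : List Int) (n : Int) (hs : l.Pairwise (· ≤ ·)) :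
    ∀ (k lo hi : Nat), hi - lo = k → lo ≤ hi → hi ≤ l.length →
    (∀ i, i < lo → l.getD i 0 ≤ n) → (∀ i, hi ≤ i → i < l.length → n < l.getD i 0) →
    pvBisect l n lo hi ≤ l.length ∧
    (∀ i, i < pvBisect l n lo hi → l.getD i 0 ≤ n) ∧
    (∀ i, pvBisect l n lo hi ≤ i → i < l.length → n < l.getD i 0) := by
  intro k
  induction k using Nat.strong_induction_on with
  | _ k ih =>
    intro lo hi hk hlh hhl hlow hhigh
    by_cases h : lo < hi
    · by_cases hc : n < l.getD ((lo + hi) / 2) 0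
      · rw [pvBisect, dif_pos h, if_pos hc]
        refine ih ((lo + hi) / 2 - lo) (by omega) lo ((lo + hi) / 2) rfl (by omega)
          (by omega) hlow ?_
        intro i hmi hilen
        exact lt_of_lt_of_le hc (pvMono l hs _ i hmi hilen)
      · rw [pvBisect, dif_pos h, if_neg hc]
        refine ih (hi - ((lo + hi) / 2 + 1)) (by omega) ((lo + hi) / 2 + 1) hi rfl
          (by omega) hhl ?_ hhigh
        intro i hi'
        have := pvMono l hs i ((lo + hi) / 2) (by omega) (by omega)
        omega
    · rw [pvBisect, dif_neg h]
      exact ⟨by omega, hlow, fun i hli hilen => hhigh i (by omega) hilen⟩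

-- the first index where p holds determines find?
lemma pvFind?_first (p : Int → Bool) : ∀ (l : List Int) (k : Nat), k ≤ l.length →
    (∀ i, i < k → p (l.getD i 0) = false) → (k < l.length → p (l.getD k 0) = true) →
    l.find? p = if k < l.length then some (l.getD k 0) else none := by
  intro l
  induction l with
  | nil =>
    intro k hk _ _
    simp
  | cons a t ih =>
    intro k hk h1 h2
    cases k with
    | zero =>
      have hpa : p a = true := by simpa using h2 (by simp)
      simp [List.find?, hpa]
    | succ k' =>
      have hpa : p a = false := by simpa using h1 0 (by omega)
      have hk' : k' ≤ t.length := by simpa using hk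
      rw [List.find?_cons_of_neg (by simp [hpa]),
        ih k' hk' (fun i hi => by simpa using h1 (i + 1) (by omega))
          (fun h => by simpa using h2 (by simpa using h))]
      simp only [List.getD_cons_succ, List.length_cons]
      split_ifs with h3 h4 <;> first | rfl | omega

-- a pyRange with positive step is strictly increasing
lemma pvRange_sorted (a b s : Int) (hs : 0 < s) :
    (PySem.List.pyRange a b s).Pairwise (· < ·) := by
  rw [PySem.List.pyRange_of_pos a b hs]
  refine List.pairwise_map.mpr ((List.pairwise_lt_range).imp ?_)
  intro k k' hkk'
  have : (k : Int) < (k' : Int) := by exact_mod_cast hkk'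
  nlinarith

-- every child of x lies in [x*10, (x+1)*10)
lemma pvExtendA_mem {d : Int} (hd : 0 < d) {arr : List Int} {y : Int}
    (hy : y ∈ pvExtendA d arr) : ∃ x ∈ arr, x * 10 ≤ y ∧ y < (x + 1) * 10 := by
  unfold pvExtendA at hy
  rw [List.mem_flatMap] at hy
  obtain ⟨x, hx, hyx⟩ := hy
  rw [PySem.List.mem_pyRange_iff_of_pos hd] at hyx
  have hstart := ((PySem.Int.neg_floordiv_neg_eq_iff_of_pos (a := x * 10)
    (q := -(PySem.Int.floordiv (-(x * 10)) d)) hd).mp rfl).2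
  exact ⟨x, hx, le_trans hstart hyx.1, hyx.2.1⟩

-- invariant: each level lives in a decade [lo, 10*lo), levels are strictly
-- increasing, and everything accumulated so far is below the current level
lemma pvALoop_sorted : ∀ (f : Nat) (d lo : Int) (arr poly : List Int), 1 ≤ lo → 1 ≤ d →
    (∀ x ∈ arr, lo ≤ x ∧ x < 10 * lo) → arr.Pairwise (· < ·) → poly.Pairwise (· < ·) →
    (∀ p ∈ poly, p < lo) → (pvALoop f d arr poly).Pairwise (· < ·) := by
  intro f
  induction f with
  | zero => intro d lo arr poly _ _ _ _ hpoly _; simpa [pvALoop] using hpoly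
  | succ f ih =>
    intro d lo arr poly hlo hd hbnd harr hpoly hplo
    by_cases ha : arr = []
    · simpa [pvALoop, ha] using hpoly
    · simp only [pvALoop, ha, ite_false]
      have hd1 : (0 : Int) < d + 1 := by omega
      refine ih (d + 1) (10 * lo) _ _ (by omega) (by omega) ?_ ?_ ?_ ?_
      · intro y hy
        obtain ⟨x, hx, h1, h2⟩ := pvExtendA_mem hd1 hy
        obtain ⟨hx1, hx2⟩ := hbnd x hx
        constructor <;> nlinarith
      · unfold pvExtendA
        refine List.pairwise_flatMap.mpr ⟨fun x _ => pvRange_sorted _ _ _ hd1, ?_⟩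
        refine harr.imp ?_
        intro x x' hxx' aa haa bb hbb
        rw [PySem.List.mem_pyRange_iff_of_pos hd1] at haa hbb
        have hstart := ((PySem.Int.neg_floordiv_neg_eq_iff_of_pos (a := x' * 10)
          (q := -(PySem.Int.floordiv (-(x' * 10)) (d + 1))) hd1).mp rfl).2
        have h1 : aa < (x + 1) * 10 := haa.2.1
        have h2 : x' * 10 ≤ bb := le_trans hstart hbb.1
        nlinarith
      · refine List.pairwise_append.mpr ⟨hpoly, harr, ?_⟩
        intro p hp x hx
        exact lt_of_lt_of_le (hplo p hp) (hbnd x hx).1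
      · intro p hp
        rcases List.mem_append.mp hp with h | h
        · have := hplo p h; omega
        · have := (hbnd p h).2; omega

-- A's full table is sorted
lemma pvPoly_sorted : (pvALoop 30 1 (PySem.List.pyRange 1 10 1) []).Pairwise (· ≤ ·) := by
  refine (pvALoop_sorted 30 1 1 _ [] le_rfl le_rfl ?_ ?_ (by simp) (by simp)).imp le_of_lt
  · intro x hx
    rw [PySem.List.mem_pyRange_one] at hx
    omega
  · exact PySem.List.pairwise_lt_pyRange_one 1 10

lemma pvKey (n : Int) : find_next_polydivisible n = find_next_polydivisible_alt n := by
  simp only [find_next_polydivisible, find_next_polydivisible_alt]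
  have hpw := pvPoly_sorted
  set l := pvALoop 30 1 (PySem.List.pyRange 1 10 1) [] with hl
  set r := pvBisect l n 0 l.length with hr
  obtain ⟨hrlen, hbelow, habove⟩ :=
    pvBisect_correct l n hpw l.length 0 l.length (by omega) (by omega) le_rfl
      (fun i hi => absurd hi (by omega)) (fun i h1 h2 => absurd h1 (by omega))
  have hBside : l.find? (fun x => decide (n < x)) = pvBLoop n 30 1 (PySem.List.pyRange 1 10 1) := by
    rw [hl, pvLoop_eq n 30 1 (by omega)]
    rfl
  have hfind : l.find? (fun x => decide (n < x)) =
      if r < l.length then some (l.getD r 0) else none :=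
    pvFind?_first _ l r hrlen
      (fun i hi => by simp only [decide_eq_false_iff_not, not_lt]; exact hbelow i hi)
      (fun h => by simp only [decide_eq_true_eq]; exact habove r le_rfl h)
  rw [← hBside, hfind]
  split_ifs with h
  · rw [PySem.List.pyGet?_natCast, List.getElem?_eq_getElem h,
      List.getD_eq_getElem _ _ h]
  · rfl

-- ===== VERDICT (by name: the statement is the Claim_ definition above) =====
theorem find_next_polydivisible_spec : Claim_equal_find_next_polydivisible := by
  intro n _
  exact pvKey n
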